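-- pv_equiv track=rewrite | github.com/dfedukov/misis-dfedukov-sys-analysis | task1/task1.py | def_5
-- ===== SOURCE A (Python) =====
-- def def_5(start, ch):
--     seen = set()
--     stack = list(ch[start])
--     while stack:
--         x = stack.pop()
--         if x in seen:
--             continue
--         seen.add(x)
--         stack.extend(ch[x])
--     return seen
-- ===== SOURCE B (Python) =====
-- def def_5(start, ch):
--     # Recursive depth-first search instead of the explicit stack loop.
--     # Children are visited in reversed order, which is exactly the order the
--     # stack version pops them in; `start` itself is never added, matching the
--     # original, and ch[...] raises the same KeyError on missing keys.
--     seen = set()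
--
--     def dfs(x):
--         if x in seen:
--             return
--         seen.add(x)
--         for c in reversed(ch[x]):
--             dfs(c)
--
--     for c in reversed(ch[start]):
--         dfs(c)
--     return seen
-- ===== Notes on version B (the rewrite author's own statement) =====
-- stated objective: alternative
-- what changed: The explicit worklist loop (pop from a growing stack, skip already-seen nodes) is replaced by a recursive depth-first search with an inner dfs helper that recurses over each node's children; no stack is materialised.
import Mathlib
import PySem

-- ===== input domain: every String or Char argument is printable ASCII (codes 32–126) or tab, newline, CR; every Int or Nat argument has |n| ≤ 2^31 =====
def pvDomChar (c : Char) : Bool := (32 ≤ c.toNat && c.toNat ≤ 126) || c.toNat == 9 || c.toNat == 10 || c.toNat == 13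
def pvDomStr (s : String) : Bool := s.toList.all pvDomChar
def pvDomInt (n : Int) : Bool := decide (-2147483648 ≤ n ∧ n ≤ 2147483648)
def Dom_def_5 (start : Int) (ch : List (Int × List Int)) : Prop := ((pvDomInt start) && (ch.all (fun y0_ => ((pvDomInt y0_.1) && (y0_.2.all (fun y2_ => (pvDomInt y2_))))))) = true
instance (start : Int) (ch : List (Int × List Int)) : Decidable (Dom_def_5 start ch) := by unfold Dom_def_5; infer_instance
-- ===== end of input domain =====

-- B replaces A's explicit worklist loop by a recursive depth-first search (inner dfs helper
-- recursing over each node's reversed child list); same result, objective: alternative decomposition.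

-- ===== PORT A =====
-- ch[x] ; Python raises KeyError on a missing key — Pre_def_5 excludes exactly those inputs,
-- so the [] default below is never the value A's lookup takes on an admitted input.
def pvChild (ch : List (Int × List Int)) (x : Int) : List Int :=
  (PySem.Dict.mk ch).getD x []

-- all child-list entries (every value a stack/recursion element can take)
def pvVals (ch : List (Int × List Int)) : List Int := (ch.map Prod.snd).flatten

-- fuel: a provably sufficient iteration budget for A's while-loop (termination guard only)
def pvFuelA (ch : List (Int × List Int)) : Nat :=
  ((pvVals ch).toFinset.card + 1) * ((pvVals ch).length + 2)

-- while stack: x = stack.pop(); if x in seen: continue; seen.add(x); stack.extend(ch[x])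
def pvLoopA (ch : List (Int × List Int)) : Nat → PySem.Set Int → List Int → PySem.Set Int
  | 0, seen, _ => seen
  | f+1, seen, stack =>
    match PySem.List.pop? stack with
    | none => seen
    | some (x, rest) =>
      if PySem.Set.contains seen x then pvLoopA ch f seen rest
      else pvLoopA ch f (PySem.Set.add seen x) (rest ++ pvChild ch x)

def def_5 (start : Int) (ch : List (Int × List Int)) : List Int :=
  pvLoopA ch (pvFuelA ch) PySem.Set.empty (pvChild ch start)

-- ===== PORT B =====
-- fuel: recursion-depth budget for dfs (termination guard only)
def pvFuelB (ch : List (Int × List Int)) : Nat := (pvVals ch).toFinset.card + 2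

mutual
-- def dfs(x): if x in seen: return; seen.add(x); for c in reversed(ch[x]): dfs(c)
def pvDfs (ch : List (Int × List Int)) (f : Nat) (seen : PySem.Set Int) (x : Int) :
    PySem.Set Int :=
  match f with
  | 0 => seen
  | g+1 =>
    if PySem.Set.contains seen x then seen
    else pvDfsList ch g (PySem.Set.add seen x) (pvChild ch x).reverse
termination_by (f, 0)

-- for c in cs: dfs(c)   (threading seen through the calls)
def pvDfsList (ch : List (Int × List Int)) (f : Nat) (seen : PySem.Set Int)
    (cs : List Int) : PySem.Set Int :=
  match cs with
  | [] => seen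
  | c :: cs' => pvDfsList ch f (pvDfs ch f seen c) cs'
termination_by (f, cs.length + 1)
end

def def_5_alt (start : Int) (ch : List (Int × List Int)) : List Int :=
  pvDfsList ch (pvFuelB ch) PySem.Set.empty (pvChild ch start).reverse

-- ===== PRECONDITION & SPEC =====
def pvKeys (ch : List (Int × List Int)) : List Int := ch.map Prod.fst

-- one monotone closure step: add the children of everything collected so far
def pvStep (ch : List (Int × List Int)) (s : PySem.Set Int) : PySem.Set Int :=
  PySem.Set.update s (s.flatMap (pvChild ch))

-- the child-closure of ch[start]; it is stable after at most |pvVals ch| + 1 steps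
def pvReach (ch : List (Int × List Int)) (start : Int) : PySem.Set Int :=
  (pvStep ch)^[(pvVals ch).length + 1] (PySem.Set.ofList (pvChild ch start))

-- Pre_: start is a key of ch and so is every node in the child-closure of ch[start] —
-- exactly the inputs on which Python A's ch[...] lookups never raise KeyError (stated as a
-- bounded monotone closure over the input, not via either port's traversal).
def Pre_def_5 (start : Int) (ch : List (Int × List Int)) : Prop :=
  start ∈ pvKeys ch ∧ ∀ x ∈ pvReach ch start, x ∈ pvKeys ch
instance (start : Int) (ch : List (Int × List Int)) : Decidable (Pre_def_5 start ch) := by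
  unfold Pre_def_5; infer_instance

def pvWitness_def_5 : Int × (List (Int × List Int)) := (0, [(0, [1]), (1, [0])])

def Spec_def_5 (start : Int) (ch : List (Int × List Int)) (out : List Int) : Prop := out = def_5_alt start ch
instance (start : Int) (ch : List (Int × List Int)) (out : List Int) : Decidable (Spec_def_5 start ch out) := by unfold Spec_def_5; infer_instance

-- ===== CLAIM (what is proved, stated in full; the proofs are below) =====
def Claim_equal_def_5 : Prop := ∀ (start : Int) (ch : List (Int × List Int)), Dom_def_5 start ch → Pre_def_5 start ch → Spec_def_5 start ch (def_5 start ch)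

-- ===== LEMMAS AND PROOFS =====

-- Python's stack.pop() on a non-empty list: the last element and the rest
theorem pvPop_snoc (ys : List Int) (x : Int) :
    PySem.List.pop? (ys ++ [x]) = some (x, ys) := by
  simp [PySem.List.pop?, PySem.List.pyIdx?]
  rw [List.eraseIdx_append_of_length_le (le_refl _)]; simp

-- everything ch[x] can yield is an entry of pvVals
theorem pvChild_mem (ch : List (Int × List Int)) (x e : Int)
    (h : e ∈ pvChild ch x) : e ∈ pvVals ch := by
  induction ch with
  | nil =>
    simp [pvChild, PySem.Dict.getD, PySem.Dict.get?] at h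
  | cons p rest ih =>
    obtain ⟨k, v⟩ := p
    have hval : pvVals ((k, v) :: rest) = v ++ pvVals rest := by simp [pvVals]
    rw [hval]
    by_cases hk : (k == x) = true
    · have : pvChild ((k, v) :: rest) x = v := by
        simp [pvChild, PySem.Dict.getD_eq_get?_getD, PySem.Dict.get?_mk_cons, hk]
      rw [this] at h
      exact List.mem_append.mpr (Or.inl h)
    · have : pvChild ((k, v) :: rest) x = pvChild rest x := by
        simp [pvChild, PySem.Dict.getD_eq_get?_getD, PySem.Dict.get?_mk_cons, hk]
      rw [this] at h
      exact List.mem_append.mpr (Or.inr (ih h))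

theorem pvChild_len (ch : List (Int × List Int)) (x : Int) :
    (pvChild ch x).length ≤ (pvVals ch).length := by
  induction ch with
  | nil => simp [pvChild, PySem.Dict.getD, PySem.Dict.get?]
  | cons p rest ih =>
    obtain ⟨k, v⟩ := p
    have hval : pvVals ((k, v) :: rest) = v ++ pvVals rest := by simp [pvVals]
    rw [hval]
    by_cases hk : (k == x) = true
    · have : pvChild ((k, v) :: rest) x = v := by
        simp [pvChild, PySem.Dict.getD_eq_get?_getD, PySem.Dict.get?_mk_cons, hk]
      rw [this]; simp
    · have : pvChild ((k, v) :: rest) x = pvChild rest x := by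
        simp [pvChild, PySem.Dict.getD_eq_get?_getD, PySem.Dict.get?_mk_cons, hk]
      rw [this]; simp; omega

-- the potential: distinct possible nodes not yet seen
def pvU (ch : List (Int × List Int)) (seen : List Int) : Nat :=
  ((pvVals ch).toFinset.filter (fun v => v ∉ seen)).card

def pvMu (ch : List (Int × List Int)) (seen stack : List Int) : Nat :=
  pvU ch seen * ((pvVals ch).length + 1) + stack.length

theorem pvU_mono (ch : List (Int × List Int)) (s s' : List Int)
    (h : ∀ v, v ∈ s → v ∈ s') : pvU ch s' ≤ pvU ch s := by
  apply Finset.card_le_card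
  intro v hv
  simp at hv ⊢
  exact ⟨hv.1, fun hs => hv.2 (h v hs)⟩

theorem pvU_add (ch : List (Int × List Int)) (seen : List Int) (x : Int)
    (hx : x ∈ pvVals ch) (hns : x ∉ seen) :
    pvU ch (PySem.Set.add seen x) + 1 ≤ pvU ch seen := by
  have hset : ((pvVals ch).toFinset.filter (fun v => v ∉ PySem.Set.add seen x)) =
      ((pvVals ch).toFinset.filter (fun v => v ∉ seen)).erase x := by
    ext v
    simp [PySem.Set.mem_add, Finset.mem_erase]
    tauto
  have hxmem : x ∈ (pvVals ch).toFinset.filter (fun v => v ∉ seen) := by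
    simp [hx, hns]
  unfold pvU
  rw [hset, Finset.card_erase_of_mem hxmem]
  have := Finset.card_pos.mpr ⟨x, hxmem⟩
  omega

-- seen only grows through dfs / the dfs loop
theorem pvGrow (ch : List (Int × List Int)) (f : Nat) :
    (∀ seen x v, v ∈ seen → v ∈ pvDfs ch f seen x) ∧
    (∀ seen cs v, v ∈ seen → v ∈ pvDfsList ch f seen cs) := by
  induction f with
  | zero =>
    constructor
    · intro seen x v hv; simpa [pvDfs] using hv
    · intro seen cs v hv
      induction cs generalizing seen with
      | nil => simpa [pvDfsList] using hv
      | cons c cs' ih => simpa [pvDfsList, pvDfs] using ih _ hv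
  | succ g ihg =>
    have hd : ∀ seen x v, v ∈ seen → v ∈ pvDfs ch (g+1) seen x := by
      intro seen x v hv
      rw [pvDfs]
      split
      · exact hv
      · exact ihg.2 _ _ _ ((PySem.Set.mem_add seen x v).mpr (Or.inl hv))
    refine ⟨hd, ?_⟩
    intro seen cs v hv
    induction cs generalizing seen with
    | nil => simpa [pvDfsList] using hv
    | cons c cs' ih =>
      rw [pvDfsList]
      exact ih _ (hd _ _ _ hv)

theorem pvDfsList_nil (ch : List (Int × List Int)) (f : Nat) (seen : PySem.Set Int) :
    pvDfsList ch f seen [] = seen := by rw [pvDfsList]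

theorem pvDfsList_cons (ch : List (Int × List Int)) (f : Nat) (seen : PySem.Set Int)
    (c : Int) (cs : List Int) :
    pvDfsList ch f seen (c :: cs) = pvDfsList ch f (pvDfs ch f seen c) cs := by
  rw [pvDfsList]

theorem pvLoopA_nil (ch : List (Int × List Int)) (f : Nat) (seen : PySem.Set Int) :
    pvLoopA ch f seen [] = seen := by
  cases f <;> rfl

theorem pvLoopA_snoc (ch : List (Int × List Int)) (g : Nat) (seen : PySem.Set Int)
    (ys : List Int) (x : Int) :
    pvLoopA ch (g+1) seen (ys ++ [x]) =
      if x ∈ seen then pvLoopA ch g seen ys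
      else pvLoopA ch g (PySem.Set.add seen x) (ys ++ pvChild ch x) := by
  rw [pvLoopA, pvPop_snoc]
  by_cases hx : x ∈ seen <;> simp [hx]

-- with enough fuel the loop's value does not depend on the fuel
theorem pvLoopA_fi (ch : List (Int × List Int)) :
    ∀ fA fA' (seen : PySem.Set Int) (stack : List Int),
      (∀ e ∈ stack, e ∈ pvVals ch) →
      pvMu ch seen stack ≤ fA → pvMu ch seen stack ≤ fA' →
      pvLoopA ch fA seen stack = pvLoopA ch fA' seen stack := by
  intro fA
  induction fA using Nat.strong_induction_on with
  | _ fA IH =>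
    intro fA' seen stack hst hA hA'
    rcases List.eq_nil_or_concat stack with hnil | ⟨ys, x, rfl⟩
    · subst hnil; rw [pvLoopA_nil, pvLoopA_nil]
    · simp only [List.concat_eq_append] at hst hA hA' ⊢
      have hlen : 1 ≤ pvMu ch seen (ys ++ [x]) := by simp [pvMu]; omega
      obtain ⟨a, rfl⟩ : ∃ a, fA = a + 1 := ⟨fA - 1, by omega⟩
      obtain ⟨b, rfl⟩ : ∃ b, fA' = b + 1 := ⟨fA' - 1, by omega⟩
      have hys : ∀ e ∈ ys, e ∈ pvVals ch := fun e he => hst e (by simp [he])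
      have hxv : x ∈ pvVals ch := hst x (by simp)
      rw [pvLoopA_snoc, pvLoopA_snoc]
      by_cases hx : x ∈ seen
      · simp only [hx, if_true]
        refine IH a (by omega) b seen ys hys ?_ ?_ <;>
          · simp only [pvMu, List.length_append, List.length_cons, List.length_nil] at hA hA' ⊢
            omega
      · simp only [hx, if_false]
        have hadd := pvU_add ch seen x hxv hx
        have hcl := pvChild_len ch x
        have key : pvU ch (PySem.Set.add seen x) * ((pvVals ch).length + 1)
              + ((pvVals ch).length + 1)
            ≤ pvU ch seen * ((pvVals ch).length + 1) := by
          have h2 := Nat.mul_le_mul_right ((pvVals ch).length + 1) hadd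
          rw [Nat.succ_mul] at h2
          exact h2
        have hmem : ∀ e ∈ ys ++ pvChild ch x, e ∈ pvVals ch := by
          intro e he
          rcases List.mem_append.mp he with h | h
          · exact hys e h
          · exact pvChild_mem ch x e h
        simp only [pvMu, List.length_append, List.length_cons, List.length_nil] at hA hA'
        refine IH a (by omega) b _ _ hmem ?_ ?_ <;>
          · simp only [pvMu, List.length_append]
            omega

-- the bridge: processing the tail of the stack with recursive dfs
theorem pvBridge (ch : List (Int × List Int)) :
    ∀ fA (seen : PySem.Set Int) (m rest : List Int) (fB fA' : Nat),
      (∀ e ∈ m, e ∈ pvVals ch) → (∀ e ∈ rest, e ∈ pvVals ch) →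
      pvMu ch seen (rest ++ m.reverse) ≤ fA →
      pvU ch seen < fB →
      pvU ch seen * ((pvVals ch).length + 1) + rest.length ≤ fA' →
      pvLoopA ch fA seen (rest ++ m.reverse) =
        pvLoopA ch fA' (pvDfsList ch fB seen m) rest := by
  intro fA
  induction fA using Nat.strong_induction_on with
  | _ fA IH =>
    intro seen m rest fB fA' hm hr hA hB hA'
    match m with
    | [] =>
      rw [pvDfsList_nil]
      simp only [List.reverse_nil, List.append_nil] at hA ⊢
      exact pvLoopA_fi ch fA fA' seen rest hr hA (by simpa [pvMu] using hA')
    | x :: m' =>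
      have hxv : x ∈ pvVals ch := hm x (by simp)
      have hm' : ∀ e ∈ m', e ∈ pvVals ch := fun e he => hm e (by simp [he])
      have hstack : rest ++ (x :: m').reverse = (rest ++ m'.reverse) ++ [x] := by
        simp
      rw [hstack] at hA ⊢
      have hlen1 : 1 ≤ pvMu ch seen ((rest ++ m'.reverse) ++ [x]) := by
        simp [pvMu]; omega
      obtain ⟨g, rfl⟩ : ∃ g, fA = g + 1 := ⟨fA - 1, by omega⟩
      obtain ⟨h, rfl⟩ : ∃ h, fB = h + 1 := ⟨fB - 1, by omega⟩
      rw [pvLoopA_snoc]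
      rw [pvDfsList_cons]
      by_cases hx : x ∈ seen
      · simp only [hx, if_true]
        have hdfs : pvDfs ch (h+1) seen x = seen := by
          rw [pvDfs]; simp [hx]
        rw [hdfs]
        exact IH g (by omega) seen m' rest (h+1) fA' hm' hr
          (by simp [pvMu, List.length_append] at hA ⊢; omega) hB hA'
      · simp only [hx, if_false]
        have hdfs : pvDfs ch (h+1) seen x =
            pvDfsList ch h (PySem.Set.add seen x) (pvChild ch x).reverse := by
          rw [pvDfs]; simp [hx]
        have hadd := pvU_add ch seen x hxv hx
        have hcl := pvChild_len ch x
        have key : pvU ch (PySem.Set.add seen x) * ((pvVals ch).length + 1)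
              + ((pvVals ch).length + 1)
            ≤ pvU ch seen * ((pvVals ch).length + 1) := by
          have h2 := Nat.mul_le_mul_right ((pvVals ch).length + 1) hadd
          rw [Nat.succ_mul] at h2
          exact h2
        simp only [pvMu, List.length_append, List.length_cons, List.length_nil,
          List.length_reverse] at hA hA'
        have hmemc : ∀ e ∈ (pvChild ch x).reverse, e ∈ pvVals ch := by
          intro e he; exact pvChild_mem ch x e (List.mem_reverse.mp he)
        have hrest2 : ∀ e ∈ rest ++ m'.reverse, e ∈ pvVals ch := by
          intro e he
          rcases List.mem_append.mp he with h1 | h1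
          · exact hr e h1
          · exact hm' e (List.mem_reverse.mp h1)
        -- first IH use: drain ch[x] (reversed) via dfsList at fuel h
        have step1 := IH g (by omega) (PySem.Set.add seen x)
          ((pvChild ch x).reverse) (rest ++ m'.reverse) h g hmemc hrest2
          (by simp only [pvMu, List.length_append, List.length_reverse,
                List.reverse_reverse]; omega)
          (by omega)
          (by simp only [List.length_append, List.length_reverse]; omega)
        simp only [List.reverse_reverse] at step1
        rw [step1, ← hdfs]
        -- second IH use: continue with m'
        have hgrow2 : ∀ v ∈ PySem.Set.add seen x, v ∈ pvDfs ch (h+1) seen x := by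
          intro v hv
          rw [hdfs]
          exact (pvGrow ch h).2 _ _ _ hv
        have humono : pvU ch (pvDfs ch (h+1) seen x) ≤ pvU ch (PySem.Set.add seen x) :=
          pvU_mono ch _ _ hgrow2
        have humul : pvU ch (pvDfs ch (h+1) seen x) * ((pvVals ch).length + 1) ≤
            pvU ch (PySem.Set.add seen x) * ((pvVals ch).length + 1) :=
          Nat.mul_le_mul_right _ humono
        exact IH g (by omega) (pvDfs ch (h+1) seen x) m' rest (h+1) fA' hm' hr
          (by simp only [pvMu, List.length_append, List.length_reverse]; omega)
          (by omega)
          (by omega)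

theorem pvU_empty (ch : List (Int × List Int)) :
    pvU ch PySem.Set.empty = (pvVals ch).toFinset.card := by
  unfold pvU
  congr 1
  apply Finset.filter_true_of_mem
  intro v _
  simp [PySem.Set.empty]

-- ===== VERDICT (by name: the statement is the Claim_ definition above) =====
theorem def_5_spec : Claim_equal_def_5 := by
  intro start ch _ _
  unfold Spec_def_5 def_5 def_5_alt
  have hN : (pvVals ch).toFinset.card ≤ (pvVals ch).length := List.toFinset_card_le _
  have hcl := pvChild_len ch start
  have hU : pvU ch PySem.Set.empty = (pvVals ch).toFinset.card := pvU_empty ch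
  have key : ((pvVals ch).toFinset.card + 1) * ((pvVals ch).length + 2)
      = (pvVals ch).toFinset.card * ((pvVals ch).length + 1)
        + ((pvVals ch).toFinset.card + (pvVals ch).length + 2) := by ring
  have hbridge := pvBridge ch (pvFuelA ch) PySem.Set.empty
    ((pvChild ch start).reverse) [] (pvFuelB ch) (pvFuelA ch)
    (fun e he => pvChild_mem ch start e (List.mem_reverse.mp he))
    (by intro e he; simp at he)
    (by
      simp only [pvMu, pvFuelA, List.nil_append, List.reverse_reverse, hU]
      omega)
    (by simp only [pvFuelB, hU]; omega)
    (by simp only [List.length_nil, pvFuelA, hU]; omega)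
  simp only [List.nil_append, List.reverse_reverse] at hbridge
  rw [hbridge, pvLoopA_nil]
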